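-- pv_equiv track=rewrite | github.com/Saulios/RedditSteamGameInfo | GOGGame.py | genres_tags
-- ===== SOURCE A (Python) =====
-- def genres_tags(genres, tags):
--     genres_tags = genres
--     tags_count = 0
--     for tag in tags:
--         if tag not in genres:
--             genres_tags.append(tag)
--             tags_count += 1
--         if tags_count == 6:
--             break
--     return genres_tags
-- ===== SOURCE B (Python) =====
-- def genres_tags(genres, tags):
--     seen = set(genres)
--     new = []
--     for tag in tags:
--         if tag not in seen:
--             seen.add(tag)
--             new.append(tag)
--     genres.extend(new[:6])
--     return genres
-- ===== Notes on version B (the rewrite author's own statement) =====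
-- stated objective: alternative
-- what changed: Replaces the append-until-counter-hits-6 loop over the growing genres list (O(n*m) membership scans) with a two-phase pass: a set-backed filter collecting new tags, then a slice-capped extend of genres.
import Mathlib
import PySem

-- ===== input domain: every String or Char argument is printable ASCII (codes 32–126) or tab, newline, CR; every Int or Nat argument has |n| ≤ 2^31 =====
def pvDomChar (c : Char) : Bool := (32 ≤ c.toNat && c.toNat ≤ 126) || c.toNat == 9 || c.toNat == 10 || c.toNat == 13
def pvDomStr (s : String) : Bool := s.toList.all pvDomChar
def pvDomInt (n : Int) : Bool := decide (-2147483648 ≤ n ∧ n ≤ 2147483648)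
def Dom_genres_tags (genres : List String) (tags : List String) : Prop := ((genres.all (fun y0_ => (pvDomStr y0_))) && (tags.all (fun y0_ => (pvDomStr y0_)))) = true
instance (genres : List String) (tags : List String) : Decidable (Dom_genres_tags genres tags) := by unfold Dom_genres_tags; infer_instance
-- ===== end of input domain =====

-- B replaces A's append-until-count-hits-6 loop (membership tested on the growing list) by a
-- set-backed filter pass followed by a slice-capped extend; return values are equal (both
-- versions also mutate the Python `genres` argument identically, A by append, B by extend).


-- ===== PORT A =====
-- `genres_tags = genres` aliases, so the membership test `tag not in genres` sees the
-- already-appended tags: the accumulator is both the growing result and the tested list.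
def gtLoopA (acc : List String) (cnt : Nat) (tags : List String) : List String :=
  match tags with
  | [] => acc
  | t :: rest =>
    let acc' := if acc.contains t then acc else acc ++ [t]
    let cnt' := if acc.contains t then cnt else cnt + 1
    if cnt' = 6 then acc' else gtLoopA acc' cnt' rest

def genres_tags (genres : List String) (tags : List String) : List String :=
  gtLoopA genres 0 tags

-- ===== PORT B =====
-- filter pass: every tag not yet in `seen`, adding it to `seen` as it is accepted
def gtCollect (seen : PySem.Set String) (tags : List String) : List String :=
  match tags with
  | [] => []
  | t :: rest =>
    if seen.contains t then gtCollect seen rest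
    else t :: gtCollect (seen.add t) rest

def genres_tags_alt (genres : List String) (tags : List String) : List String :=
  genres ++ (gtCollect (PySem.Set.ofList genres) tags).take 6

-- ===== PRECONDITION & SPEC =====
def Spec_genres_tags (genres : List String) (tags : List String) (out : List String) : Prop := out = genres_tags_alt genres tags
instance (genres : List String) (tags : List String) (out : List String) : Decidable (Spec_genres_tags genres tags out) := by unfold Spec_genres_tags; infer_instance

-- ===== CLAIM (what is proved, stated in full; the proofs are below) =====
def Claim_equal_genres_tags : Prop := ∀ (genres : List String) (tags : List String), Dom_genres_tags genres tags → Spec_genres_tags genres tags (genres_tags genres tags)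

-- ===== LEMMAS AND PROOFS =====
theorem gtLoopA_eq_take (tags : List String) :
    ∀ (s : PySem.Set String) (acc : List String) (cnt : Nat), cnt < 6 →
      (∀ x, x ∈ s ↔ x ∈ acc) →
      gtLoopA acc cnt tags = acc ++ (gtCollect s tags).take (6 - cnt) := by
  induction tags with
  | nil => intro s acc cnt _ _; simp [gtLoopA, gtCollect]
  | cons t rest ih =>
    intro s acc cnt hcnt hmem
    have hc : s.contains t = acc.contains t := by
      simp only [PySem.Set.contains_eq_listContains, List.contains_eq_mem]
      by_cases h : t ∈ acc
      · simp [h, (hmem t).mpr h]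
      · have : t ∉ s := fun hs => h ((hmem t).mp hs)
        simp [h, this]
    by_cases h : t ∈ acc
    · have hcA : acc.contains t = true := by simpa using h
      have hcS : s.contains t = true := hc ▸ hcA
      have hne : cnt ≠ 6 := Nat.ne_of_lt hcnt
      simp only [gtLoopA, gtCollect, hcA, hcS, if_pos, hne, if_false]
      exact ih s acc cnt hcnt hmem
    · have hcA : acc.contains t = false := by simpa using h
      have hcS : s.contains t = false := hc ▸ hcA
      simp only [gtLoopA, gtCollect, hcA, hcS, Bool.false_eq_true, if_false]
      by_cases h6 : cnt + 1 = 6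
      · have : cnt = 5 := by omega
        subst this
        simp [List.take]
      · have hcnt' : cnt + 1 < 6 := by omega
        have hmem' : ∀ x, x ∈ s.add t ↔ x ∈ acc ++ [t] := by
          intro x
          simp [PySem.Set.mem_add, hmem x, or_comm]
        rw [if_neg h6, ih (s.add t) (acc ++ [t]) (cnt + 1) hcnt' hmem']
        have h65 : 6 - cnt = (6 - (cnt + 1)) + 1 := by omega
        simp [h65, List.take_succ_cons]


-- ===== VERDICT (by name: the statement is the Claim_ definition above) =====
theorem genres_tags_spec : Claim_equal_genres_tags := by
  intro genres tags _
  unfold Spec_genres_tags genres_tags genres_tags_alt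
  exact gtLoopA_eq_take tags (PySem.Set.ofList genres) genres 0 (by omega)
    (fun x => PySem.Set.mem_ofList genres x)
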